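-- pv_equiv track=rewrite | github.com/Mookimooki/algorithm | dfs-bfs/7.py | normalizePeice
-- ===== SOURCE A (Python) =====
-- def normalizePeice(peice):
--     x1, y1, x2, y2 = 50, 50, 0, 0
--     for coord in peice:
--         x1, y1 = min(x1, coord[0]), min(y1, coord[1])
--         x2, y2 = max(x2, coord[0]), max(y2, coord[1])
--     matrix = [[0 for _ in range(y2-y1+1)] for _ in range(x2-x1+1)]
--     for x, y in peice:
--         matrix[x-x1][y-y1] = 1
--     return matrix
-- ===== SOURCE B (Python) =====
-- def normalizePeice(peice):
--     xs = [c[0] for c in peice]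
--     ys = [c[1] for c in peice]
--     x1, y1 = min([50] + xs), min([50] + ys)
--     x2, y2 = max([0] + xs), max([0] + ys)
--     coords = {(c[0], c[1]) for c in peice}
--     return [[1 if (x1 + i, y1 + j) in coords else 0 for j in range(y2 - y1 + 1)]
--             for i in range(x2 - x1 + 1)]
-- ===== Notes on version B (the rewrite author's own statement) =====
-- stated objective: idiomatic
-- what changed: Instead of allocating a zero matrix and mutating one entry per point, B computes the bounding box with min/max over the coordinate lists and builds the matrix directly by scanning every output cell and testing membership in a set of coordinates.
import Mathlib
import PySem

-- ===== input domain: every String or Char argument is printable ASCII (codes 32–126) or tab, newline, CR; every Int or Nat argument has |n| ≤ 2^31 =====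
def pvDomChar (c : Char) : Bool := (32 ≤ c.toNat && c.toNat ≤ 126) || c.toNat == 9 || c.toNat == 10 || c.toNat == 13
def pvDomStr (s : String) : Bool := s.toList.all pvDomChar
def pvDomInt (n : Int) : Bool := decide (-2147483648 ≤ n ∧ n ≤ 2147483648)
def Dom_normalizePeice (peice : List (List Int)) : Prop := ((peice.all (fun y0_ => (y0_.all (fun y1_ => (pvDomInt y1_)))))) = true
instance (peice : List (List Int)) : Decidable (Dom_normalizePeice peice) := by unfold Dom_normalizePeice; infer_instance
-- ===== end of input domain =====

-- B builds the output by scanning every cell of the bounding box and testing membership in a set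
-- of coordinates, instead of allocating a zero matrix and mutating one entry per point (A mutates
-- its local `matrix` only; the return value is what is claimed).

-- ===== PORT A =====
-- Indices x - x1, y - y1 are nonnegative and in range whenever Pre_ holds, so .toNat is exact there.
def normalizePeice (peice : List (List Int)) : List (List Int) :=
  let bb := peice.foldl (fun (s : Int × Int × Int × Int) coord =>
      (min s.1 (PySem.List.pyGetD coord 0 0),
       min s.2.1 (PySem.List.pyGetD coord 1 0),
       max s.2.2.1 (PySem.List.pyGetD coord 0 0),
       max s.2.2.2 (PySem.List.pyGetD coord 1 0))) (50, 50, 0, 0)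
  let x1 := bb.1
  let y1 := bb.2.1
  let x2 := bb.2.2.1
  let y2 := bb.2.2.2
  let matrix := (PySem.List.pyRange 0 (x2 - x1 + 1) 1).map (fun _ =>
      (PySem.List.pyRange 0 (y2 - y1 + 1) 1).map (fun _ => (0 : Int)))
  peice.foldl (fun m coord =>
      match coord with
      | [x, y] => m.modify ((x - x1).toNat) (fun row => row.set ((y - y1).toNat) 1)
      | _ => m) matrix  -- Python raises ValueError unpacking a row of length ≠ 2; excluded by Pre_

-- ===== PORT B =====
def normalizePeice_alt (peice : List (List Int)) : List (List Int) :=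
  let xs := peice.map (fun c => PySem.List.pyGetD c 0 0)
  let ys := peice.map (fun c => PySem.List.pyGetD c 1 0)
  let x1 := (PySem.List.min? ((50 : Int) :: xs) (fun v => v)).getD 0
  let y1 := (PySem.List.min? ((50 : Int) :: ys) (fun v => v)).getD 0
  let x2 := (PySem.List.max? ((0 : Int) :: xs) (fun v => v)).getD 0
  let y2 := (PySem.List.max? ((0 : Int) :: ys) (fun v => v)).getD 0
  let coords := PySem.Set.ofList (peice.map (fun c =>
      (PySem.List.pyGetD c 0 0, PySem.List.pyGetD c 1 0)))
  (PySem.List.pyRange 0 (x2 - x1 + 1) 1).map (fun i =>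
    (PySem.List.pyRange 0 (y2 - y1 + 1) 1).map (fun j =>
      if (x1 + i, y1 + j) ∈ coords then (1 : Int) else 0))

-- ===== PRECONDITION & SPEC =====
-- Pre_ excludes rows of length ≠ 2, on which A raises (IndexError / ValueError while unpacking).
def Pre_normalizePeice (peice : List (List Int)) : Prop :=
  ∀ c ∈ peice, c.length = 2
instance (peice : List (List Int)) : Decidable (Pre_normalizePeice peice) := by
  unfold Pre_normalizePeice; infer_instance

def pvWitness_normalizePeice : List (List Int) := [[0, 1], [2, 2], [1, 1]]

def Spec_normalizePeice (peice : List (List Int)) (out : List (List Int)) : Prop := out = normalizePeice_alt peice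
instance (peice : List (List Int)) (out : List (List Int)) : Decidable (Spec_normalizePeice peice out) := by unfold Spec_normalizePeice; infer_instance

-- ===== CLAIM (what is proved, stated in full; the proofs are below) =====
def Claim_equal_normalizePeice : Prop := ∀ (peice : List (List Int)), Dom_normalizePeice peice → Pre_normalizePeice peice → Spec_normalizePeice peice (normalizePeice peice)

-- ===== LEMMAS AND PROOFS =====

-- The indicator matrix: cell (i, j) is 1 iff the point (x1+i, y1+j) occurs in S.
def pvInd (x1 y1 : Int) (R C : Nat) (S : List (Int × Int)) : List (List Int) :=
  (List.range R).map (fun (i : Nat) => (List.range C).map (fun (j : Nat) =>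
    if ((x1 + (i : Int), y1 + (j : Int)) ∈ S) then (1 : Int) else 0))

-- Marking one in-range point in an indicator matrix appends that point to the indicated set.
lemma pvInd_mark (x1 y1 : Int) (R C : Nat) (S : List (Int × Int)) (x y : Int)
    (hx1 : x1 ≤ x) (hxR : (x - x1).toNat < R) (hy1 : y1 ≤ y) (hyC : (y - y1).toNat < C) :
    (pvInd x1 y1 R C S).modify (x - x1).toNat (fun row => row.set (y - y1).toNat 1)
      = pvInd x1 y1 R C (S ++ [(x, y)]) := by
  apply List.ext_getElem
  · simp [pvInd]
  intro i h1 h2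
  simp only [pvInd, List.length_map, List.length_range] at h1 h2
  rw [List.getElem_modify]
  by_cases hi : (x - x1).toNat = i
  · subst hi
    simp only [pvInd, List.getElem_map, List.getElem_range, if_pos]
    apply List.ext_getElem
    · simp
    intro j j1 j2
    simp only [List.length_set, List.length_map, List.length_range] at j1 j2
    rw [List.getElem_set]
    by_cases hj : (y - y1).toNat = j
    · have hT : (x1 + ((x - x1).toNat : Int) = x ∧ y1 + (j : Int) = y) := by omega
      simp only [if_pos hj, List.getElem_map, List.getElem_range, List.mem_append,
        List.mem_singleton, Prod.mk.injEq]
      rw [if_pos (Or.inr hT)]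
    · have hF : ¬(x1 + ((x - x1).toNat : Int) = x ∧ y1 + (j : Int) = y) := by omega
      simp only [if_neg hj, List.getElem_map, List.getElem_range, List.mem_append,
        List.mem_singleton, Prod.mk.injEq]
      simp only [or_iff_left hF]
  · simp only [if_neg hi, pvInd, List.getElem_map, List.getElem_range]
    apply List.map_congr_left
    intro j hj
    have hF : ¬(x1 + (i : Int) = x ∧ y1 + (j : Int) = y) := by omega
    simp only [List.mem_append, List.mem_singleton, Prod.mk.injEq]
    simp only [or_iff_left hF]

-- A's marking loop over in-range two-element rows turns pvInd S into pvInd (S ++ those points).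
lemma pvFold_mark (x1 y1 : Int) (R C : Nat) (pts : List (List Int))
    (h : ∀ c ∈ pts, ∃ x y, c = [x, y] ∧ x1 ≤ x ∧ (x - x1).toNat < R ∧ y1 ≤ y ∧ (y - y1).toNat < C) :
    ∀ S : List (Int × Int),
      pts.foldl (fun m coord =>
          match coord with
          | [x, y] => m.modify ((x - x1).toNat) (fun row => row.set ((y - y1).toNat) 1)
          | _ => m) (pvInd x1 y1 R C S)
        = pvInd x1 y1 R C (S ++ pts.map (fun c =>
            (PySem.List.pyGetD c 0 0, PySem.List.pyGetD c 1 0))) := by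
  induction pts with
  | nil => intro S; simp
  | cons c rest ih =>
    intro S
    obtain ⟨x, y, rfl, hx1, hxR, hy1, hyC⟩ := h c (List.mem_cons_self ..)
    simp only [List.foldl_cons]
    rw [pvInd_mark x1 y1 R C S x y hx1 hxR hy1 hyC,
        ih (fun c hc => h c (by simp [hc]))]
    have : PySem.List.pyGetD [x, y] 0 0 = x ∧ PySem.List.pyGetD [x, y] 1 0 = y := by
      constructor <;> simp [pysem]
    simp [this.1, this.2]

-- A's single foldl over a 4-tuple is the 4-tuple of the four scalar folds.
lemma pvBB (pts : List (List Int)) (a b c d : Int) :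
    pts.foldl (fun (s : Int × Int × Int × Int) coord =>
      (min s.1 (PySem.List.pyGetD coord 0 0),
       min s.2.1 (PySem.List.pyGetD coord 1 0),
       max s.2.2.1 (PySem.List.pyGetD coord 0 0),
       max s.2.2.2 (PySem.List.pyGetD coord 1 0))) (a, b, c, d)
    = (pts.foldl (fun v coord => min v (PySem.List.pyGetD coord 0 0)) a,
       pts.foldl (fun v coord => min v (PySem.List.pyGetD coord 1 0)) b,
       pts.foldl (fun v coord => max v (PySem.List.pyGetD coord 0 0)) c,
       pts.foldl (fun v coord => max v (PySem.List.pyGetD coord 1 0)) d) := by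
  induction pts generalizing a b c d with
  | nil => rfl
  | cons p t ih => simp only [List.foldl_cons]; exact ih _ _ _ _

-- A's freshly allocated zero matrix is the indicator matrix of the empty set.
lemma pvZeros_eq (x1 y1 n m : Int) :
    (PySem.List.pyRange 0 n 1).map (fun _ =>
        (PySem.List.pyRange 0 m 1).map (fun _ => (0 : Int)))
      = pvInd x1 y1 n.toNat m.toNat [] := by
  simp [pvInd, PySem.List.pyRange_one, Function.comp_def, List.map_const']

-- B's cell scan is the indicator matrix of its coordinate set.
lemma pvIndB_eq (x1 y1 n m : Int) (S : List (Int × Int)) :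
    (PySem.List.pyRange 0 n 1).map (fun i =>
        (PySem.List.pyRange 0 m 1).map (fun j =>
          if (x1 + i, y1 + j) ∈ PySem.Set.ofList S then (1 : Int) else 0))
      = pvInd x1 y1 n.toNat m.toNat S := by
  simp [pvInd, PySem.List.pyRange_one, PySem.Set.mem_ofList, List.map_map, Function.comp]

-- ===== VERDICT (by name: the statement is the Claim_ definition above) =====
theorem normalizePeice_spec : Claim_equal_normalizePeice := by
  intro peice _ hpre
  unfold Spec_normalizePeice
  simp only [normalizePeice, normalizePeice_alt]
  rw [pvBB, PySem.List.min?_id_cons, PySem.List.min?_id_cons,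
      PySem.List.max?_id_cons, PySem.List.max?_id_cons]
  simp only [Option.getD_some, List.foldl_map]
  set a1 := peice.foldl (fun v coord => min v (PySem.List.pyGetD coord 0 0)) 50 with ha1
  set b1 := peice.foldl (fun v coord => min v (PySem.List.pyGetD coord 1 0)) 50 with hb1
  set a2 := peice.foldl (fun v coord => max v (PySem.List.pyGetD coord 0 0)) 0 with ha2
  set b2 := peice.foldl (fun v coord => max v (PySem.List.pyGetD coord 1 0)) 0 with hb2
  have hminx : ∀ c ∈ peice, a1 ≤ PySem.List.pyGetD c 0 0 := by
    intro c hc; rw [ha1, ← List.foldl_map]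
    exact (PySem.List.foldl_min_le _ _).2 _ (List.mem_map_of_mem hc)
  have hminy : ∀ c ∈ peice, b1 ≤ PySem.List.pyGetD c 1 0 := by
    intro c hc; rw [hb1, ← List.foldl_map]
    exact (PySem.List.foldl_min_le _ _).2 _ (List.mem_map_of_mem hc)
  have hmaxx : ∀ c ∈ peice, PySem.List.pyGetD c 0 0 ≤ a2 := by
    intro c hc; rw [ha2, ← List.foldl_map]
    exact (PySem.List.le_foldl_max _ _).2 _ (List.mem_map_of_mem hc)
  have hmaxy : ∀ c ∈ peice, PySem.List.pyGetD c 1 0 ≤ b2 := by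
    intro c hc; rw [hb2, ← List.foldl_map]
    exact (PySem.List.le_foldl_max _ _).2 _ (List.mem_map_of_mem hc)
  rw [pvZeros_eq a1 b1, pvIndB_eq,
      pvFold_mark a1 b1 (a2 - a1 + 1).toNat (b2 - b1 + 1).toNat peice ?_ []]
  · simp
  · intro c hc
    have hlen := hpre c hc
    rcases c with _ | ⟨x, _ | ⟨y, _ | ⟨z, t⟩⟩⟩ <;> simp at hlen
    have hg0 : PySem.List.pyGetD [x, y] 0 0 = x := by simp [pysem]
    have hg1 : PySem.List.pyGetD [x, y] 1 0 = y := by simp [pysem]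
    have h1 := hminx _ hc; have h2 := hminy _ hc
    have h3 := hmaxx _ hc; have h4 := hmaxy _ hc
    rw [hg0] at h1 h3; rw [hg1] at h2 h4
    exact ⟨x, y, rfl, h1, by omega, h2, by omega⟩
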